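-- pv_equiv track=rewrite | github.com/parthchandak02/literature-review-assistant | src/restart/fulltext_pipeline.py | _strip_tei
-- ===== SOURCE A (Python) =====
-- def _strip_tei(tei_xml: str) -> str:
--     # Lightweight XML tag removal to keep dependency surface small.
--     output: list[str] = []
--     inside = False
--     for char in tei_xml:
--         if char == "<":
--             inside = True
--             continue
--         if char == ">":
--             inside = False
--             continue
--         if not inside:
--             output.append(char)
--     return "".join(output).strip()
-- ===== SOURCE B (Python) =====
-- def _strip_tei(tei_xml: str) -> str:
--     # Recursive partition-based tag removal: split off text before the next '<',
--     # drop through the matching '>', recurse on the remainder.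
--     def untag(s: str) -> str:
--         text, opened, tag_rest = s.partition("<")
--         kept = text.replace(">", "")
--         if not opened:
--             return kept
--         _, closed, rest = tag_rest.partition(">")
--         if not closed:
--             return kept
--         return kept + untag(rest)
--     return untag(tei_xml).strip()
-- ===== Notes on version B (the rewrite author's own statement) =====
-- stated objective: faster
-- what changed: Replaced the character-by-character state-machine loop with a recursive partition-based pass that splits off the text before each '<' and drops through the matching '>', doing the scanning in C-level str.partition/str.replace instead of per-character Python bytecode.
import Mathlib
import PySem

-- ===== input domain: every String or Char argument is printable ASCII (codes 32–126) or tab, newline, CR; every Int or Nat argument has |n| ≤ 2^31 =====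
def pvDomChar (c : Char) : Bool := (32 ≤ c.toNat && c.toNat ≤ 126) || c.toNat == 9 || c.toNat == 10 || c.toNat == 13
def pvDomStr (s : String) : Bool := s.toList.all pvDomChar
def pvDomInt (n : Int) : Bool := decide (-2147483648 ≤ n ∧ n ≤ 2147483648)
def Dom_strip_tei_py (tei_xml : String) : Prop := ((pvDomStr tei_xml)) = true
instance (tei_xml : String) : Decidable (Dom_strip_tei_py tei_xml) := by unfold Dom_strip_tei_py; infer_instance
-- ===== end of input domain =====

-- B replaces A's per-character state-machine loop with a recursive partition-based pass (objective: faster, measured).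

-- ===== PORT A =====
-- Literal port of A: a fold over the characters carrying (output, inside);
-- output is the list of kept characters, joined and stripped at the end.
def strip_tei_py (tei_xml : String) : String :=
  String.ofList (PySem.Chars.strip
    (tei_xml.toList.foldl
      (fun (st : List Char × Bool) char =>
        if char = '<' then (st.1, true)
        else if char = '>' then (st.1, false)
        else if st.2 then st
        else (st.1 ++ [char], st.2))
      ([], false)).1)

-- ===== PORT B =====
-- str.partition(sep) has no PySem primitive; untag inlines it by hand via
-- Chars.find (exact for the nonempty separators "<" and ">" used here):
-- found at i ⇒ (s.take i, sep, s.drop (i+1)); not found ⇒ (s, "", "").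
def untag (s : List Char) : List Char :=
  let i := PySem.Chars.find s ['<']
  if _h1 : i = -1 then PySem.Chars.replace s ['>'] []
  else
    let kept := PySem.Chars.replace (s.take i.toNat) ['>'] []
    let tagRest := s.drop (i.toNat + 1)
    let j := PySem.Chars.find tagRest ['>']
    if j = -1 then kept
    else kept ++ untag (tagRest.drop (j.toNat + 1))
termination_by s.length
decreasing_by
  have hne : s ≠ [] := by
    intro hnil
    subst hnil
    exact _h1 (by decide)
  have : 0 < s.length := List.length_pos_iff.mpr hne
  simp only [List.length_drop]
  omega

def strip_tei_py_alt (tei_xml : String) : String :=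
  String.ofList (PySem.Chars.strip (untag tei_xml.toList))

-- ===== PRECONDITION & SPEC =====
def Spec_strip_tei_py (tei_xml : String) (out : String) : Prop := out = strip_tei_py_alt tei_xml
instance (tei_xml : String) (out : String) : Decidable (Spec_strip_tei_py tei_xml out) := by unfold Spec_strip_tei_py; infer_instance

-- ===== CLAIM (what is proved, stated in full; the proofs are below) =====
def Claim_equal_strip_tei_py : Prop := ∀ (tei_xml : String), Dom_strip_tei_py tei_xml → Spec_strip_tei_py tei_xml (strip_tei_py tei_xml)

-- ===== LEMMAS AND PROOFS =====

-- A's loop body as a structural recursion with the `inside` flag.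
def fA : Bool → List Char → List Char
  | _, [] => []
  | ins, c :: t =>
    if c = '<' then fA true t
    else if c = '>' then fA false t
    else if ins then fA ins t
    else c :: fA ins t

theorem foldl_fA (l : List Char) : ∀ (acc : List Char) (ins : Bool),
    (l.foldl (fun (st : List Char × Bool) char =>
      if char = '<' then (st.1, true)
      else if char = '>' then (st.1, false)
      else if st.2 then st
      else (st.1 ++ [char], st.2)) (acc, ins)).1 = acc ++ fA ins l := by
  induction l with
  | nil => intro acc ins; simp [fA]
  | cons c t ih =>
    intro acc ins
    by_cases h1 : c = '<'
    · simp [h1, fA, ih]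
    · by_cases h2 : c = '>'
      · simp [h2, fA, ih]
      · cases ins with
        | false => simp [h1, h2, fA, ih]
        | true => simp [h2, fA, ih]

-- Chars.find for a single-character needle.
theorem find_go_single (ch : Char) : ∀ (l : List Char) (k : Nat),
    PySem.Chars.find.go [ch] l k =
      if ch ∈ l then ((k : Int) + (l.takeWhile (· ≠ ch)).length) else -1 := by
  intro l
  induction l with
  | nil => intro k; simp [PySem.Chars.find.go]
  | cons c t ih =>
    intro k
    by_cases h : c = ch
    · subst h
      simp [PySem.Chars.find.go, List.isPrefixOf, List.takeWhile]
    · have hpre : List.isPrefixOf [ch] (c :: t) = false := by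
        simp [List.isPrefixOf]
        exact fun hc => absurd hc.symm h
      have hm : (ch ∈ c :: t) = (ch ∈ t) := by
        simp [List.mem_cons]
        intro hc; exact absurd hc.symm h
      simp only [PySem.Chars.find.go, hpre, Bool.false_eq_true, if_false, ih]
      by_cases hmem : ch ∈ t
      · simp [hmem, hm, List.takeWhile, h]
        ring
      · simp [hmem, hm]

theorem find_single (ch : Char) (l : List Char) :
    PySem.Chars.find l [ch] =
      if ch ∈ l then ((l.takeWhile (· ≠ ch)).length : Int) else -1 := by
  have := find_go_single ch l 0
  simpa [PySem.Chars.find] using this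

-- Chars.replace of a single character by the empty string is a filter.
theorem replace_go_single (ch : Char) : ∀ (l : List Char) (fuel : Nat) (acc : List Char),
    l.length ≤ fuel →
    PySem.Chars.replace.go [ch] [] fuel l acc = acc.reverse ++ l.filter (· ≠ ch) := by
  intro l
  induction l with
  | nil =>
    intro fuel acc _
    cases fuel <;> simp [PySem.Chars.replace.go]
  | cons c t ih =>
    intro fuel acc hlen
    cases fuel with
    | zero => simp at hlen
    | succ f =>
      by_cases h : c = ch
      · subst h
        have hpre : List.isPrefixOf [c] (c :: t) = true := by
          simp [List.isPrefixOf]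
        simp only [PySem.Chars.replace.go, hpre, if_true, List.reverse_nil, List.nil_append]
        rw [show List.drop (List.length [c]) (c :: t) = t by simp]
        rw [ih f acc (by simpa using Nat.le_of_succ_le_succ hlen)]
        simp
      · have hpre : List.isPrefixOf [ch] (c :: t) = false := by
          simp [List.isPrefixOf]
          exact fun hc => absurd hc.symm h
        simp only [PySem.Chars.replace.go, hpre, Bool.false_eq_true, if_false]
        rw [ih f (c :: acc) (by simpa using Nat.le_of_succ_le_succ hlen)]
        simp [h]

theorem replace_single (ch : Char) (l : List Char) :
    PySem.Chars.replace l [ch] [] = l.filter (· ≠ ch) := by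
  simp only [PySem.Chars.replace]
  rw [if_neg (by simp)]
  simpa using replace_go_single ch l l.length [] (le_refl _)

-- fA on a '<'-free list in the outside state keeps everything but '>'.
theorem fA_false_no_lt (l : List Char) (h : '<' ∉ l) :
    fA false l = l.filter (· ≠ '>') := by
  induction l with
  | nil => simp [fA]
  | cons c t ih =>
    have hc : c ≠ '<' := fun hh => h (hh ▸ List.mem_cons_self ..)
    have ht : '<' ∉ t := fun hh => h (List.mem_cons_of_mem _ hh)
    by_cases h2 : c = '>'
    · simp [fA, h2, ih ht]
    · simp [fA, hc, h2, ih ht]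

-- fA in the inside state with no '>' drops everything.
theorem fA_true_no_gt (l : List Char) (h : '>' ∉ l) : fA true l = [] := by
  induction l with
  | nil => simp [fA]
  | cons c t ih =>
    have hc : c ≠ '>' := fun hh => h (hh ▸ List.mem_cons_self ..)
    have ht : '>' ∉ t := fun hh => h (List.mem_cons_of_mem _ hh)
    by_cases h1 : c = '<' <;> simp [fA, hc, h1, ih ht]

-- Splitting fA at the first '<' (outside state).
theorem fA_false_split (t r : List Char) (h : '<' ∉ t) :
    fA false (t ++ '<' :: r) = t.filter (· ≠ '>') ++ fA true r := by
  induction t with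
  | nil => simp [fA]
  | cons c t' ih =>
    have hc : c ≠ '<' := fun hh => h (hh ▸ List.mem_cons_self ..)
    have ht : '<' ∉ t' := fun hh => h (List.mem_cons_of_mem _ hh)
    by_cases h2 : c = '>'
    · simp [fA, h2, ih ht]
    · simp [fA, hc, h2, ih ht]

-- Splitting fA at the first '>' (inside state).
theorem fA_true_split (t r : List Char) (h : '>' ∉ t) :
    fA true (t ++ '>' :: r) = fA false r := by
  induction t with
  | nil => simp [fA]
  | cons c t' ih =>
    have hc : c ≠ '>' := fun hh => h (hh ▸ List.mem_cons_self ..)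
    have ht : '>' ∉ t' := fun hh => h (List.mem_cons_of_mem _ hh)
    by_cases h1 : c = '<' <;> simp [fA, hc, h1, ih ht]

-- Decompose a list at the first occurrence of ch.
theorem split_at_first (ch : Char) (l : List Char) (h : ch ∈ l) :
    l = l.takeWhile (· ≠ ch) ++ ch :: l.drop ((l.takeWhile (· ≠ ch)).length + 1) := by
  induction l with
  | nil => cases h
  | cons c t ih =>
    by_cases hc : c = ch
    · subst hc; simp
    · have ht : ch ∈ t := by
        rcases List.mem_cons.mp h with h1 | h1
        · exact absurd h1.symm hc
        · exact h1
      rw [List.takeWhile_cons, if_pos (by simp [hc])]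
      simp only [List.length_cons, List.drop_succ_cons, List.cons_append]
      exact congrArg (c :: ·) (ih ht)


theorem takeWhile_not_mem (ch : Char) (l : List Char) : ch ∉ l.takeWhile (· ≠ ch) := by
  intro hmem
  have := List.mem_takeWhile_imp hmem
  simp at this

theorem main_eq (s : List Char) : fA false s = untag s := by
  generalize hn : s.length = n
  induction n using Nat.strong_induction_on generalizing s with
  | _ n ih =>
    subst hn
    rw [untag]
    by_cases hmem : '<' ∈ s
    · have hfind : PySem.Chars.find s ['<'] = ((s.takeWhile (· ≠ '<')).length : Int) := by
        rw [find_single]; simp [hmem]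
      have hne : ¬ (PySem.Chars.find s ['<'] = -1) := by rw [hfind]; omega
      rw [dif_neg hne]
      have htoNat : (PySem.Chars.find s ['<']).toNat = (s.takeWhile (· ≠ '<')).length := by
        rw [hfind]; simp
      rw [htoNat]
      have hdec := split_at_first '<' s hmem
      have htake : s.take (s.takeWhile (· ≠ '<')).length = s.takeWhile (· ≠ '<') :=
        (List.prefix_iff_eq_take.mp (List.takeWhile_prefix _)).symm
      rw [htake]
      have hlt : '<' ∉ s.takeWhile (· ≠ '<') := takeWhile_not_mem '<' s
      have hlhs : fA false s = (s.takeWhile (· ≠ '<')).filter (· ≠ '>')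
          ++ fA true (s.drop ((s.takeWhile (· ≠ '<')).length + 1)) := by
        conv_lhs => rw [hdec]
        exact fA_false_split _ _ hlt
      rw [hlhs, replace_single]
      have hslen : 0 < s.length := List.length_pos_iff.mpr (by rintro rfl; cases hmem)
      set r := s.drop ((s.takeWhile (· ≠ '<')).length + 1) with hrdef
      by_cases hmem2 : '>' ∈ r
      · have hfind2 : PySem.Chars.find r ['>'] = ((r.takeWhile (· ≠ '>')).length : Int) := by
          rw [find_single]; simp [hmem2]
        have hne2 : ¬ (PySem.Chars.find r ['>'] = -1) := by rw [hfind2]; omega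
        rw [if_neg hne2]
        have htoNat2 : (PySem.Chars.find r ['>']).toNat = (r.takeWhile (· ≠ '>')).length := by
          rw [hfind2]; simp
        rw [htoNat2]
        have hdec2 := split_at_first '>' r hmem2
        have hgt : '>' ∉ r.takeWhile (· ≠ '>') := takeWhile_not_mem '>' r
        have htrue : fA true r = fA false (r.drop ((r.takeWhile (· ≠ '>')).length + 1)) := by
          conv_lhs => rw [hdec2]
          exact fA_true_split _ _ hgt
        rw [htrue]
        congr 1
        exact ih _ (by simp [hrdef, List.length_drop]; omega) _ rfl
      · have hfind2 : PySem.Chars.find r ['>'] = -1 := by rw [find_single]; simp [hmem2]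
        rw [if_pos hfind2, fA_true_no_gt r hmem2, List.append_nil]
    · have hfind : PySem.Chars.find s ['<'] = -1 := by rw [find_single]; simp [hmem]
      rw [dif_pos hfind, replace_single]
      exact fA_false_no_lt s hmem

-- ===== VERDICT (by name: the statement is the Claim_ definition above) =====
theorem strip_tei_py_spec : Claim_equal_strip_tei_py := by
  intro s _
  unfold Spec_strip_tei_py strip_tei_py strip_tei_py_alt
  rw [foldl_fA s.toList [] false]
  simp [main_eq]
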